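-- pv_equiv track=rewrite | github.com/davidfstein/lev-code | lev-code.py | build
-- ===== SOURCE A (Python) =====
-- def minimumEditDistance(s1,s2):
--     if len(s1) > len(s2):
--         s1,s2 = s2,s1
--     distances = range(len(s1) + 1)
--     for index2,char2 in enumerate(s2):
--         newDistances = [index2+1]
--         for index1,char1 in enumerate(s1):
--             if char1 == char2:
--                 newDistances.append(distances[index1])
--             else:
--                 newDistances.append(1 + min((distances[index1],
--                                              distances[index1+1],
--                                              newDistances[-1])))
--         distances = newDistances
--     return distances[-1]
--
-- def build(all_codes):
--    # good_codes = get_two_random(all_codes)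
--     good_codes = ["230013", "110321", "220022"]
--     for code in all_codes:
--         far = True
--         for good in good_codes:
--             if minimumEditDistance(code, good) < 3:
--                 far = False
--                 break
--         if far:
--             good_codes.append(code)
--     return good_codes
-- ===== SOURCE B (Python) =====
-- def minimumEditDistance(s1, s2):
--     # top-down recurrence over the two prefixes, memoized on (i, j)
--     memo = {}
--     def ed(i, j):
--         if i == 0:
--             return j
--         if j == 0:
--             return i
--         key = (i, j)
--         if key in memo:
--             return memo[key]
--         if s1[i - 1] == s2[j - 1]:
--             r = ed(i - 1, j - 1)
--         else:
--             r = 1 + min(ed(i - 1, j), ed(i, j - 1), ed(i - 1, j - 1))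
--         memo[key] = r
--         return r
--     return ed(len(s1), len(s2))
--
-- def build(all_codes):
--     good_codes = ["230013", "110321", "220022"]
--     for code in all_codes:
--         if all(minimumEditDistance(code, g) >= 3 for g in good_codes):
--             good_codes.append(code)
--     return good_codes
-- ===== Notes on version B (the rewrite author's own statement) =====
-- stated objective: alternative
-- what changed: minimumEditDistance is reimplemented as a top-down recursive Levenshtein recurrence on prefix lengths, memoized in a dict keyed by (i,j) (instead of the bottom-up rolling-row DP, and without A's swap of the two strings), and build's inner break-loop becomes an all(...) test.
import Mathlib
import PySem

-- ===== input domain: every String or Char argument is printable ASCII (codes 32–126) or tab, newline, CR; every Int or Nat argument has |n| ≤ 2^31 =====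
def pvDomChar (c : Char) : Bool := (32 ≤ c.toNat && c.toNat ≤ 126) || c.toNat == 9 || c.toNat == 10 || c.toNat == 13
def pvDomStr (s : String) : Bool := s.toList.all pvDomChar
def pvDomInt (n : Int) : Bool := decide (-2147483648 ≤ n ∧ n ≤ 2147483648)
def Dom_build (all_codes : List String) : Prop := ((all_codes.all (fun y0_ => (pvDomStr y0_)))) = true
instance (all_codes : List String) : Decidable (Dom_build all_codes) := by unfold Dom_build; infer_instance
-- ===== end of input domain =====

-- B is an alternative (not faster) implementation: the bottom-up rolling-row edit-distance DP
-- becomes a top-down memoized recurrence, and the inner break-loop becomes an all(...) test.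

-- ===== PORT A =====
-- A's minimumEditDistance: swap so s1 is shorter, then rolling-row DP.
-- All list indices A uses are in range; they are ported with getD / pyGetD.
def medA_inner (c1 : List Char) (distances : List Nat) (index2 : Nat) (char2 : Char) : List Nat :=
  (PySem.List.enumerate c1).foldl
    (fun nd p =>
      if p.2 = char2 then nd ++ [distances.getD p.1.toNat 0]
      else nd ++ [1 + min (distances.getD p.1.toNat 0)
                      (min (distances.getD (p.1.toNat + 1) 0)
                           (PySem.List.pyGetD nd (-1) 0))])
    [index2 + 1]

def medA (s1 s2 : String) : Nat :=
  let pr := if s1.toList.length > s2.toList.length then (s2, s1) else (s1, s2)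
  let c1 := pr.1.toList
  let c2 := pr.2.toList
  let distances :=
    (PySem.List.enumerate c2).foldl
      (fun distances p => medA_inner c1 distances p.1.toNat p.2)
      (List.range (c1.length + 1))
  PySem.List.pyGetD distances (-1) 0

-- A's inner 'for good in good_codes: … break' loop
def farA (code : String) : List String → Bool
  | [] => true
  | g :: gs => if medA code g < 3 then false else farA code gs

def build (all_codes : List String) : List String :=
  all_codes.foldl
    (fun good_codes code =>
      if farA code good_codes then good_codes ++ [code] else good_codes)
    ["230013", "110321", "220022"]

-- ===== PORT B =====
-- B's memoized top-down recurrence ed(i,j); the memo dict is threaded through the calls.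
def edM (s t : List Char) : (i j : Nat) → PySem.Dict (Nat × Nat) Nat → Nat × PySem.Dict (Nat × Nat) Nat
  | 0, j, m => (j, m)
  | i+1, 0, m => (i+1, m)
  | i+1, j+1, m =>
    match m.get? (i+1, j+1) with
    | some v => (v, m)
    | none =>
      let p :=
        if s.getD i ' ' = t.getD j ' ' then edM s t i j m
        else
          let q1 := edM s t i (j+1) m
          let q2 := edM s t (i+1) j q1.2
          let q3 := edM s t i j q2.2
          (1 + min q1.1 (min q2.1 q3.1), q3.2)
      (p.1, p.2.insert (i+1, j+1) p.1)
termination_by i j _ => i + j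

def medB (s1 s2 : String) : Nat :=
  (edM s1.toList s2.toList s1.toList.length s2.toList.length PySem.Dict.empty).1

def build_alt (all_codes : List String) : List String :=
  all_codes.foldl
    (fun good_codes code =>
      if good_codes.all (fun g => 3 ≤ medB code g) then good_codes ++ [code]
      else good_codes)
    ["230013", "110321", "220022"]

-- ===== PRECONDITION & SPEC =====
def Spec_build (all_codes : List String) (out : List String) : Prop := out = build_alt all_codes
instance (all_codes : List String) (out : List String) : Decidable (Spec_build all_codes out) := by unfold Spec_build; infer_instance

-- ===== CLAIM (what is proved, stated in full; the proofs are below) =====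
def Claim_equal_build : Prop := ∀ (all_codes : List String), Dom_build all_codes → Spec_build all_codes (build all_codes)

-- ===== LEMMAS AND PROOFS =====

-- Pure Levenshtein recurrence on prefix lengths (proof-side reference point).
def edP (s t : List Char) : Nat → Nat → Nat
  | 0, j => j
  | i+1, 0 => i+1
  | i+1, j+1 =>
    if s.getD i ' ' = t.getD j ' ' then edP s t i j
    else 1 + min (edP s t i (j+1)) (min (edP s t (i+1) j) (edP s t i j))
termination_by i j => i + j

theorem edP_zero_left (s t : List Char) (j : Nat) : edP s t 0 j = j := by rw [edP]

theorem edP_zero_right (s t : List Char) (i : Nat) : edP s t i 0 = i := by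
  cases i with
  | zero => rw [edP]
  | succ k => rw [edP]

theorem edP_succ_succ (s t : List Char) (i j : Nat) :
    edP s t (i+1) (j+1) =
      if s.getD i ' ' = t.getD j ' ' then edP s t i j
      else 1 + min (edP s t i (j+1)) (min (edP s t (i+1) j) (edP s t i j)) := by
  rw [edP]

theorem edM_succ_succ (s t : List Char) (i j : Nat) (m : PySem.Dict (Nat × Nat) Nat) :
    edM s t (i+1) (j+1) m =
      (match m.get? (i+1, j+1) with
       | some v => (v, m)
       | none =>
         let p :=
           if s.getD i ' ' = t.getD j ' ' then edM s t i j m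
           else
             let q1 := edM s t i (j+1) m
             let q2 := edM s t (i+1) j q1.2
             let q3 := edM s t i j q2.2
             (1 + min q1.1 (min q2.1 q3.1), q3.2)
         (p.1, p.2.insert (i+1, j+1) p.1)) := by
  rw [edM]

theorem edP_symm (s t : List Char) (i j : Nat) : edP s t i j = edP t s j i := by
  have H : ∀ n, ∀ i j : Nat, i + j ≤ n → edP s t i j = edP t s j i := by
    intro n
    induction n with
    | zero =>
      intro i j h
      have hi : i = 0 := by omega
      have hj : j = 0 := by omega
      subst hi; subst hj
      rw [edP_zero_left, edP_zero_right]
    | succ n ih =>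
      intro i j h
      match i, j with
      | 0, j => rw [edP_zero_left, edP_zero_right]
      | i+1, 0 => rw [edP_zero_left, edP_zero_right]
      | i+1, j+1 =>
        rw [edP_succ_succ, edP_succ_succ]
        rw [ih i j (by omega), ih i (j+1) (by omega), ih (i+1) j (by omega)]
        by_cases hc : s.getD i ' ' = t.getD j ' '
        · rw [if_pos hc, if_pos hc.symm]
        · have hc' : ¬ t.getD j ' ' = s.getD i ' ' := fun h' => hc h'.symm
          rw [if_neg hc, if_neg hc']
          omega
  exact H (i + j) i j le_rfl

-- memo invariant: every stored value is the true edP value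
def MInv (s t : List Char) (m : PySem.Dict (Nat × Nat) Nat) : Prop :=
  ∀ k v, m.get? k = some v → v = edP s t k.1 k.2

theorem MInv_insert (s t : List Char) (m : PySem.Dict (Nat × Nat) Nat) (i j : Nat) (v : Nat)
    (hm : MInv s t m) (hv : v = edP s t i j) : MInv s t (m.insert (i, j) v) := by
  intro k w hk
  rw [PySem.Dict.get?_insert] at hk
  split at hk
  · next heq =>
    injection hk with hw
    subst heq
    rw [← hw, hv]
  · exact hm _ _ hk

theorem edM_correct (s t : List Char) :
    ∀ n, ∀ (i j : Nat) (m : PySem.Dict (Nat × Nat) Nat), i + j ≤ n → MInv s t m →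
      (edM s t i j m).1 = edP s t i j ∧ MInv s t (edM s t i j m).2 := by
  intro n
  induction n with
  | zero =>
    intro i j m h hm
    have hi : i = 0 := by omega
    have hj : j = 0 := by omega
    subst hi; subst hj
    exact ⟨by rw [edM, edP_zero_left], by rw [edM]; exact hm⟩
  | succ n ih =>
    intro i j m h hm
    match i, j with
    | 0, j => exact ⟨by rw [edM, edP_zero_left], by rw [edM]; exact hm⟩
    | i+1, 0 => exact ⟨by rw [edM, edP_zero_right], by rw [edM]; exact hm⟩
    | i+1, j+1 =>
      rw [edM_succ_succ]
      cases hg : m.get? (i+1, j+1) with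
      | some v => exact ⟨hm _ _ hg, hm⟩
      | none =>
        by_cases hc : s.getD i ' ' = t.getD j ' '
        · obtain ⟨h1, h2⟩ := ih i j m (by omega) hm
          simp only [if_pos hc]
          have hval : (edM s t i j m).1 = edP s t (i+1) (j+1) := by
            rw [edP_succ_succ, if_pos hc]; exact h1
          exact ⟨hval, MInv_insert s t _ _ _ _ h2 hval⟩
        · obtain ⟨h1, m1h⟩ := ih i (j+1) m (by omega) hm
          obtain ⟨h2, m2h⟩ := ih (i+1) j _ (by omega) m1h
          obtain ⟨h3, m3h⟩ := ih i j _ (by omega) m2h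
          simp only [if_neg hc]
          have hval : 1 + min (edM s t i (j+1) m).1
              (min (edM s t (i+1) j (edM s t i (j+1) m).2).1
                   (edM s t i j (edM s t (i+1) j (edM s t i (j+1) m).2).2).1)
              = edP s t (i+1) (j+1) := by
            rw [edP_succ_succ, if_neg hc, h1, h2, h3]
          exact ⟨hval, MInv_insert s t _ _ _ _ m3h hval⟩

theorem medB_eq (s1 s2 : String) :
    medB s1 s2 = edP s1.toList s2.toList s1.toList.length s2.toList.length := by
  have hinv : MInv s1.toList s2.toList PySem.Dict.empty := by
    intro k v hk
    simp [PySem.Dict.get?_empty] at hk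
  exact (edM_correct s1.toList s2.toList _ _ _ _ le_rfl hinv).1

-- the DP row after processing the first j+1 characters of c2, up to prefix length k of c1
def edRow (c1 c2 : List Char) (k j : Nat) : List Nat :=
  (List.range (k + 1)).map (fun i => edP c1 c2 i (j + 1))

theorem edRow_succ (c1 c2 : List Char) (k j : Nat) :
    edRow c1 c2 (k + 1) j = edRow c1 c2 k j ++ [edP c1 c2 (k + 1) (j + 1)] := by
  simp [edRow, List.range_succ]

theorem edRow_getD (c1 c2 : List Char) (k j i : Nat) (hi : i ≤ k) :
    (edRow c1 c2 k j).getD i 0 = edP c1 c2 i (j + 1) := by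
  unfold edRow
  rw [List.getD_eq_getElem?_getD, List.getElem?_map, List.getElem?_range (by omega)]
  rfl

theorem getD_append_cons (done rest : List Char) (x : Char) :
    (done ++ x :: rest).getD done.length ' ' = x := by
  rw [List.getD_eq_getElem?_getD, List.getElem?_append_right (Nat.le_refl done.length)]
  simp

theorem inner_go (c1 c2 : List Char) (j : Nat) (distances : List Nat)
    (hd : ∀ i, i ≤ c1.length → distances.getD i 0 = edP c1 c2 i j) :
    ∀ (rest done : List Char), done ++ rest = c1 →
      (PySem.List.enumerate rest (done.length : Int)).foldl
        (fun nd p =>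
          if p.2 = c2.getD j ' ' then nd ++ [distances.getD p.1.toNat 0]
          else nd ++ [1 + min (distances.getD p.1.toNat 0)
                          (min (distances.getD (p.1.toNat + 1) 0)
                               (PySem.List.pyGetD nd (-1) 0))])
        (edRow c1 c2 done.length j)
      = edRow c1 c2 c1.length j := by
  intro rest
  induction rest with
  | nil =>
    intro done hdone
    rw [PySem.List.enumerate_nil, List.foldl_nil, ← hdone]
    simp
  | cons x rest ih =>
    intro done hdone
    rw [PySem.List.enumerate_cons]
    simp only [List.foldl_cons]
    have hk : done.length < c1.length := by
      rw [← hdone]; simp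
    have hx : x = c1.getD done.length ' ' := by
      rw [← hdone, getD_append_cons]
    have hlast : PySem.List.pyGetD (edRow c1 c2 done.length j) (-1) 0
        = edP c1 c2 done.length (j + 1) := by
      have hsplit : edRow c1 c2 done.length j
          = (List.range done.length).map (fun i => edP c1 c2 i (j + 1))
            ++ [edP c1 c2 done.length (j + 1)] := by
        simp [edRow, List.range_succ]
      rw [hsplit]
      exact PySem.List.pyGetD_neg_one_append_singleton _ _ _
    have hstep :
        (if x = c2.getD j ' ' then
            edRow c1 c2 done.length j ++ [distances.getD ((done.length : Int)).toNat 0]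
          else
            edRow c1 c2 done.length j ++
              [1 + min (distances.getD ((done.length : Int)).toNat 0)
                  (min (distances.getD (((done.length : Int)).toNat + 1) 0)
                       (PySem.List.pyGetD (edRow c1 c2 done.length j) (-1) 0))])
        = edRow c1 c2 (done.length + 1) j := by
      rw [edRow_succ]
      simp only [Int.toNat_natCast]
      rw [hd done.length (by omega), hd (done.length + 1) (by omega), hlast, hx]
      rw [edP_succ_succ]
      by_cases hc : c1.getD done.length ' ' = c2.getD j ' '
      · rw [if_pos hc, if_pos hc]
      · rw [if_neg hc, if_neg hc]
        congr 2
        omega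
    rw [hstep]
    have h1 : edRow c1 c2 (done.length + 1) j = edRow c1 c2 (done ++ [x]).length j := by
      simp
    have h2 : ((done.length : Int) + 1) = ((done ++ [x]).length : Int) := by
      simp
    rw [h1, h2]
    exact ih (done ++ [x]) (by simpa using hdone)

theorem inner_eq (c1 c2 : List Char) (j : Nat) (distances : List Nat)
    (hd : ∀ i, i ≤ c1.length → distances.getD i 0 = edP c1 c2 i j) :
    medA_inner c1 distances j (c2.getD j ' ') = edRow c1 c2 c1.length j := by
  have h := inner_go c1 c2 j distances hd c1 [] (by simp)
  unfold medA_inner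
  have hbase : edRow c1 c2 (List.length ([] : List Char)) j = [j + 1] := by
    simp [edRow, edP_zero_left]
  rw [hbase] at h
  simpa using h

theorem row0 (c1 c2 : List Char) (i : Nat) (hi : i ≤ c1.length) :
    (List.range (c1.length + 1)).getD i 0 = edP c1 c2 i 0 := by
  rw [List.getD_eq_getElem?_getD, List.getElem?_range (by omega)]
  rw [edP_zero_right]
  rfl

theorem outer_go (c1 c2 : List Char) :
    ∀ (rest done : List Char), done ++ rest = c2 →
      ∀ distances, distances.length = c1.length + 1 →
      (∀ i, i ≤ c1.length → distances.getD i 0 = edP c1 c2 i done.length) →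
      (PySem.List.enumerate rest (done.length : Int)).foldl
        (fun distances p => medA_inner c1 distances p.1.toNat p.2)
        distances
      = (List.range (c1.length + 1)).map (fun i => edP c1 c2 i c2.length) := by
  intro rest
  induction rest with
  | nil =>
    intro done hdone distances hdlen hinv
    rw [PySem.List.enumerate_nil, List.foldl_nil]
    have hlen : done.length = c2.length := by rw [← hdone]; simp
    apply List.ext_getElem
    · simp [hdlen]
    · intro k h1 h2
      simp only [List.getElem_map, List.getElem_range]
      have := hinv k (by simp at h2; omega)
      rw [List.getD_eq_getElem?_getD, List.getElem?_eq_getElem h1] at this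
      simp at this
      rw [this, hlen]
  | cons x rest ih =>
    intro done hdone distances hdlen hinv
    rw [PySem.List.enumerate_cons]
    simp only [List.foldl_cons]
    have hj : done.length < c2.length := by rw [← hdone]; simp
    have hx : x = c2.getD done.length ' ' := by
      rw [← hdone, getD_append_cons]
    have hstep : medA_inner c1 distances ((done.length : Int)).toNat x
        = edRow c1 c2 c1.length done.length := by
      simp only [Int.toNat_natCast]
      rw [hx]
      exact inner_eq c1 c2 done.length distances hinv
    rw [hstep]
    have h2 : ((done.length : Int) + 1) = ((done ++ [x]).length : Int) := by simp
    rw [h2]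
    apply ih (done ++ [x]) (by simpa using hdone) _ (by simp [edRow])
    intro i hi
    have : (done ++ [x]).length = done.length + 1 := by simp
    rw [this]
    exact edRow_getD c1 c2 c1.length done.length i hi

theorem med_core (c1 c2 : List Char) :
    PySem.List.pyGetD
      ((PySem.List.enumerate c2).foldl
        (fun distances p => medA_inner c1 distances p.1.toNat p.2)
        (List.range (c1.length + 1))) (-1) 0
    = edP c1 c2 c1.length c2.length := by
  have h := outer_go c1 c2 c2 [] (by simp) (List.range (c1.length + 1)) (by simp)
      (by intro i hi
          have := row0 c1 c2 i hi
          simpa using this)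
  have h0 : ((List.length ([] : List Char) : Int)) = (0 : Int) := by simp
  rw [h0] at h
  rw [show (PySem.List.enumerate c2) = (PySem.List.enumerate c2 (0 : Int)) from rfl]
  rw [h]
  rw [show (List.range (c1.length + 1)).map (fun i => edP c1 c2 i c2.length)
        = (List.range c1.length).map (fun i => edP c1 c2 i c2.length)
          ++ [edP c1 c2 c1.length c2.length] from by simp [List.range_succ]]
  exact PySem.List.pyGetD_neg_one_append_singleton _ _ _

theorem medA_eq (s1 s2 : String) :
    medA s1 s2 = edP s1.toList s2.toList s1.toList.length s2.toList.length := by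
  unfold medA
  by_cases hl : s1.toList.length > s2.toList.length
  · simp only [if_pos hl]
    rw [med_core s2.toList s1.toList]
    exact (edP_symm s2.toList s1.toList _ _)
  · simp only [if_neg hl]
    exact med_core s1.toList s2.toList

theorem far_eq (code : String) (good : List String) :
    farA code good = good.all (fun g => 3 ≤ medB code g) := by
  induction good with
  | nil => simp [farA]
  | cons g gs ih =>
    have h : medA code g = medB code g := by rw [medA_eq, medB_eq]
    by_cases hc : medA code g < 3
    · have hb : ¬ (3 ≤ medB code g) := by omega
      simp [farA, if_pos hc, hb]
    · have hb : 3 ≤ medB code g := by omega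
      simp [farA, if_neg hc, hb, ih]

-- ===== VERDICT (by name: the statement is the Claim_ definition above) =====
theorem build_spec : Claim_equal_build := by
  intro all_codes _
  unfold Spec_build build build_alt
  have h : (fun (good_codes : List String) (code : String) =>
              if farA code good_codes then good_codes ++ [code] else good_codes)
         = (fun good_codes code =>
              if good_codes.all (fun g => 3 ≤ medB code g) then good_codes ++ [code]
              else good_codes) := by
    funext good code
    rw [far_eq]
  rw [h]
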